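-- pv_equiv track=rewrite | github.com/Usman600/Space-Optimizer1 | test.py | create_Triangle
-- ===== SOURCE A (Python) =====
-- def create_Triangle(width,place):
--     triangle = []
--     for i in range(width):
--         triangle.append([])
--         triangle[-1] = [0 for j in range(width - i - 1)]
--         triangle[-1] += [place for j in range(2 * i + 1)]
--         triangle[-1] += [0 for j in range(width - i - 1)]
--     return triangle
-- ===== SOURCE B (Python) =====
-- def create_Triangle(width, place):
--     c = width - 1
--     return [[place if abs(j - c) <= i else 0 for j in range(2 * width - 1)]
--             for i in range(width)]
-- ===== Notes on version B (the rewrite author's own statement) =====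
-- stated objective: alternative
-- what changed: Each row is computed cell-by-cell over range(2*width-1) with a center-distance test abs(j-(width-1)) <= i, instead of concatenating three homogeneous runs (left zeros, place block, right zeros).
import Mathlib
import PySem

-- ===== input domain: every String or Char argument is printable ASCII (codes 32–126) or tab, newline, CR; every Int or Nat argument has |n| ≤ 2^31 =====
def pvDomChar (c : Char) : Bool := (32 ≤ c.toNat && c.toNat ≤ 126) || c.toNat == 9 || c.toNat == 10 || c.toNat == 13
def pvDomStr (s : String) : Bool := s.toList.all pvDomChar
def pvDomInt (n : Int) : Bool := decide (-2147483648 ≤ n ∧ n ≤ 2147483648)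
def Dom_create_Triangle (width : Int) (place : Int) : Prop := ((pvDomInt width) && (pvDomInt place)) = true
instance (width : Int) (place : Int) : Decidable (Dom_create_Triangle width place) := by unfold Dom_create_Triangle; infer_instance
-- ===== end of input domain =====

-- B builds each row cell-by-cell with a center-distance test instead of concatenating three runs; same cost, different decomposition.

-- ===== PORT A =====
def create_Triangle (width : Int) (place : Int) : List (List Int) :=
  (PySem.List.pyRange 0 width 1).foldl (fun triangle i =>
    -- triangle.append([]); triangle[-1] = zeros; += places; += zeros  ⇒ append the built row
    let row := (PySem.List.pyRange 0 (width - i - 1) 1).map (fun _ => (0 : Int))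
    let row := row ++ (PySem.List.pyRange 0 (2 * i + 1) 1).map (fun _ => place)
    let row := row ++ (PySem.List.pyRange 0 (width - i - 1) 1).map (fun _ => (0 : Int))
    triangle ++ [row]) []

-- ===== PORT B =====
def create_Triangle_alt (width : Int) (place : Int) : List (List Int) :=
  (PySem.List.pyRange 0 width 1).map (fun i =>
    (PySem.List.pyRange 0 (2 * width - 1) 1).map (fun j =>
      if |j - (width - 1)| ≤ i then place else 0))

-- ===== PRECONDITION & SPEC =====
def Spec_create_Triangle (width : Int) (place : Int) (out : List (List Int)) : Prop := out = create_Triangle_alt width place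
instance (width : Int) (place : Int) (out : List (List Int)) : Decidable (Spec_create_Triangle width place out) := by unfold Spec_create_Triangle; infer_instance

-- ===== CLAIM (what is proved, stated in full; the proofs are below) =====
def Claim_equal_create_Triangle : Prop := ∀ (width : Int) (place : Int), Dom_create_Triangle width place → Spec_create_Triangle width place (create_Triangle width place)

-- ===== LEMMAS AND PROOFS =====

-- One row of A (three concatenated runs) equals one row of B (per-cell test), for 0 ≤ i < width.
theorem create_Triangle_row_eq (width place i : Int) (h0 : 0 ≤ i) (h1 : i < width) :
    ((PySem.List.pyRange 0 (width - i - 1) 1).map (fun _ => (0 : Int))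
      ++ (PySem.List.pyRange 0 (2 * i + 1) 1).map (fun _ => place))
      ++ (PySem.List.pyRange 0 (width - i - 1) 1).map (fun _ => (0 : Int))
    = (PySem.List.pyRange 0 (2 * width - 1) 1).map (fun j =>
        if |j - (width - 1)| ≤ i then place else 0) := by
  apply List.ext_getElem
  · simp [PySem.List.length_pyRange_one]
    omega
  · intro k hk1 hk2
    simp only [List.getElem_map, PySem.List.getElem_pyRange_one]
    simp only [abs_le]
    rw [List.getElem_append]
    split
    next h2 =>
      rw [List.getElem_append]
      split
      next h3 =>
        simp only [List.getElem_map]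
        simp only [List.length_map, PySem.List.length_pyRange_one] at h3
        split <;> omega
      next h3 =>
        simp only [List.getElem_map]
        simp only [List.length_append, List.length_map, PySem.List.length_pyRange_one] at h2 h3
        split <;> omega
    next h2 =>
      simp only [List.getElem_map]
      simp only [List.length_append, List.length_map, PySem.List.length_pyRange_one] at h2
      simp only [List.length_append, List.length_map, PySem.List.length_pyRange_one] at hk1
      split <;> omega

-- ===== VERDICT (by name: the statement is the Claim_ definition above) =====
theorem create_Triangle_spec : Claim_equal_create_Triangle := by
  intro width place _
  unfold Spec_create_Triangle create_Triangle create_Triangle_alt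
  rw [PySem.List.foldl_append_singleton_eq_map]
  rw [List.nil_append]
  apply List.map_congr_left
  intro i hi
  rw [PySem.List.mem_pyRange_one] at hi
  exact create_Triangle_row_eq width place i hi.1 hi.2
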